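-- pv_equiv track=rewrite | github.com/jakubDoka/stackery | py.py | generate_color_commands
-- ===== SOURCE A (Python) =====
-- import bisect
--
-- def generate_color_commands(text, ranges):
--     # Sort the ranges in ascending order by start position
--     sorted_ranges = sorted(ranges, key=lambda r: r[0])
--
--     # Initialize the list of color commands
--     commands = []
--
--     # Iterate over the sorted ranges and insert/split to the ranges list
--     ranges_list = []
--     last_inserted_range_index = -1
--     for i, (range_start, range_end, color, is_background) in enumerate(sorted_ranges):
--         # Skip searching within ranges that come before the last inserted range
--         search_start_index = last_inserted_range_index + 1
--         ranges_list = insert_range(ranges_list, range_start, range_end, color, is_background, search_start_index)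
--         last_inserted_range_index = i
--
--     # Generate the color commands for the ranges
--     for i in range(len(text)):
--         fg_color, bg_color = None, None
--         for start, end, color, is_background in ranges_list:
--             if start <= i < end:
--                 if is_background:
--                     bg_color = color
--                 else:
--                     fg_color = color
--         if bg_color is not None:
--             command = f"\033[48;2;{bg_color[0]};{bg_color[1]};{bg_color[2]};2m"
--             commands.append(command)
--         if fg_color is not None:
--             command = f"\033[38;2;{fg_color[0]};{fg_color[1]};{fg_color[2]}m"
--             commands.append(command)
--         commands.append(text[i])
--     commands.append("\033[0m")
--
--     return "".join(commands)
--
-- def insert_range(ranges, range_start, range_end, color, is_background, search_start_index=0):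
--     i = bisect.bisect_left(ranges, (range_start,), search_start_index)
--     if i < len(ranges):
--         start, end, range_color, _ = ranges[i]
--         if start < range_end:
--             # Range overlaps with an existing range, split it into two ranges
--             ranges[i:i+1] = [(start, range_start, range_color, is_background),
--                              (range_start, min(end, range_end), color, is_background),
--                              (min(end, range_end), end, range_color, is_background)]
--             return ranges
--     # Range doesn't overlap with any existing ranges, insert it
--     ranges.insert(i, (range_start, range_end, color, is_background))
--     return ranges
-- ===== SOURCE B (Python) =====
-- import bisect
--
--
-- def _insert(rs, s, e, color, is_bg, lo):
--     # purely functional insert/split (same range algebra as the original, no mutation)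
--     i = bisect.bisect_left(rs, (s,), lo)
--     if i < len(rs) and rs[i][0] < e:
--         t0, t1, c0, _ = rs[i]
--         m = min(t1, e)
--         return rs[:i] + [(t0, s, c0, is_bg), (s, m, color, is_bg), (m, t1, c0, is_bg)] + rs[i + 1:]
--     return rs[:i] + [(s, e, color, is_bg)] + rs[i:]
--
--
-- def generate_color_commands(text, ranges):
--     rl = []
--     for k, r in enumerate(sorted(ranges, key=lambda t: t[0])):
--         rl = _insert(rl, r[0], r[1], r[2], r[3], k)
--     # paint the two color layers once (later list entries overwrite earlier ones),
--     # instead of scanning every range for every character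
--     n = len(text)
--     fg = [None] * n
--     bg = [None] * n
--     for s, e, color, is_bg in rl:
--         buf = bg if is_bg else fg
--         for i in range(max(s, 0), min(e, n)):
--             buf[i] = color
--     out = []
--     for i, ch in enumerate(text):
--         c = bg[i]
--         if c is not None:
--             out.append(f"\033[48;2;{c[0]};{c[1]};{c[2]};2m")
--         c = fg[i]
--         if c is not None:
--             out.append(f"\033[38;2;{c[0]};{c[1]};{c[2]}m")
--         out.append(ch)
--     out.append("\033[0m")
--     return "".join(out)
-- ===== Notes on version B (the rewrite author's own statement) =====
-- stated objective: faster
-- what changed: B keeps the range insert/split phase (written functionally) but replaces A's per-character scan over the whole split-range list by a single painting pass that writes each range's color into per-character fg/bg arrays (later list entries overwrite earlier ones, which is exactly A's last-match-wins rule), then emits in one sweep.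
import Mathlib
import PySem

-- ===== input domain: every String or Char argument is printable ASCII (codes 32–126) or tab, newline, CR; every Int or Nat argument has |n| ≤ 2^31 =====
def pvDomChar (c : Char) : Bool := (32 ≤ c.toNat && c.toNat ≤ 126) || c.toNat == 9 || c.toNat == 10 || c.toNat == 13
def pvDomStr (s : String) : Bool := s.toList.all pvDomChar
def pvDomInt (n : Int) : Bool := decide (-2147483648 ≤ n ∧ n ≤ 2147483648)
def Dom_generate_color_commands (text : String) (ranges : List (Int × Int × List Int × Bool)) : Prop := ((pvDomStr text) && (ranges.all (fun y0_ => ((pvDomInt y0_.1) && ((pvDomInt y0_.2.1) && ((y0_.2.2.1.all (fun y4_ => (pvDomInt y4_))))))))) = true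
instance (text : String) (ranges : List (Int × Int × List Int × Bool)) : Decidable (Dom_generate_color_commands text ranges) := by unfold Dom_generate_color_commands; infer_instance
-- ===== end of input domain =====

-- B replaces A's per-character scan over all split ranges by one painting pass into
-- per-character fg/bg arrays (objective: faster; the return value is proved identical on Pre_).

-- shared helpers (used verbatim by both ports: formatting and the bisect primitive)

-- bisect.bisect_left(rs, (s,), lo): a 1-tuple (s,) compares against a 4-tuple (t0,t1,c,b) by the
-- first component only (on a tie the shorter tuple is smaller), so 'rs[mid] < (s,)' is 'rs[mid].1 < s'.
-- PySem.List.bisectLeft has no 'lo' parameter, so the CPython binary-search loop is ported by hand.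
def pvBisect (rs : List (Int × Int × List Int × Bool)) (s : Int) (lo hi : Nat) : Nat :=
  if h : lo < hi then
    let mid := (lo + hi) / 2
    -- rs[mid]: at every call hi ≤ rs.length, so mid < rs.length and the default is unreachable
    if (rs.getD mid (0, 0, [], false)).1 < s then pvBisect rs s (mid + 1) hi
    else pvBisect rs s lo mid
  else lo
termination_by hi - lo
decreasing_by all_goals omega

-- f"\033[38;2;{c[0]};{c[1]};{c[2]}m"; Pre_ guarantees 3 ≤ c.length wherever this is reached,
-- so the getD defaults are unreachable there (Python raises IndexError on a shorter color)
def fmtFg (c : List Int) : String :=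
  "\x1b[38;2;" ++ PySem.Int.toStr (c.getD 0 0) ++ ";" ++ PySem.Int.toStr (c.getD 1 0) ++ ";"
    ++ PySem.Int.toStr (c.getD 2 0) ++ "m"

-- f"\033[48;2;{c[0]};{c[1]};{c[2]};2m"
def fmtBg (c : List Int) : String :=
  "\x1b[48;2;" ++ PySem.Int.toStr (c.getD 0 0) ++ ";" ++ PySem.Int.toStr (c.getD 1 0) ++ ";"
    ++ PySem.Int.toStr (c.getD 2 0) ++ ";2m"

-- ===== PORT A =====

-- insert_range: ranges[i:i+1] = [...] is take i ++ [...] ++ drop (i+1); ranges.insert(i, x)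
-- is take i ++ x :: drop i (i ≤ len always holds, list.insert would clamp anyway)
def insertRangeA (rs : List (Int × Int × List Int × Bool)) (s e : Int) (c : List Int) (b : Bool)
    (lo : Nat) : List (Int × Int × List Int × Bool) :=
  let i := pvBisect rs s lo rs.length
  if _h : i < rs.length then
    let r := rs.getD i (0, 0, [], false)
    if r.1 < e then
      rs.take i ++ [(r.1, s, r.2.2.1, b), (s, min r.2.1 e, c, b), (min r.2.1 e, r.2.1, r.2.2.1, b)]
        ++ rs.drop (i + 1)
    else rs.take i ++ (s, e, c, b) :: rs.drop i
  else rs.take i ++ (s, e, c, b) :: rs.drop i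

def generate_color_commands (text : String) (ranges : List (Int × Int × List Int × Bool)) : String :=
  let sortedRanges := PySem.List.sorted ranges (fun r => r.1)
  -- for i, (…) in enumerate(sorted_ranges): ranges_list = insert_range(…, last_inserted+1 = i)
  let rl := (sortedRanges.foldl
    (fun (st : List (Int × Int × List Int × Bool) × Nat) r =>
      (insertRangeA st.1 r.1 r.2.1 r.2.2.1 r.2.2.2 st.2, st.2 + 1)) ([], 0)).1
  let cs := text.toList
  let cmds := (PySem.List.pyRange 0 (cs.length : Int) 1).foldl
    (fun (cmds : List String) i =>
      let p := rl.foldl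
        (fun (p : Option (List Int) × Option (List Int)) r =>
          if r.1 ≤ i ∧ i < r.2.1 then
            (if r.2.2.2 then (p.1, some r.2.2.1) else (some r.2.2.1, p.2))
          else p)
        (none, none)
      let cmds := match p.2 with | some c => cmds ++ [fmtBg c] | none => cmds
      let cmds := match p.1 with | some c => cmds ++ [fmtFg c] | none => cmds
      -- text[i] with 0 ≤ i < len(text): in range, the default is unreachable
      cmds ++ [String.singleton (PySem.List.pyGetD cs i ' ')])
    []
  PySem.Str.join "" (cmds ++ ["\x1b[0m"])

-- ===== PORT B =====

-- _insert: purely functional rs[:i] + […] + rs[i+1:] / rs[:i] + [new] + rs[i:]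
def insertRangeB (rs : List (Int × Int × List Int × Bool)) (s e : Int) (c : List Int) (b : Bool)
    (lo : Nat) : List (Int × Int × List Int × Bool) :=
  let i := pvBisect rs s lo rs.length
  match rs[i]? with
  | some r =>
      if r.1 < e then
        rs.take i ++ [(r.1, s, r.2.2.1, b), (s, min r.2.1 e, c, b), (min r.2.1 e, r.2.1, r.2.2.1, b)]
          ++ rs.drop (i + 1)
      else rs.take i ++ [(s, e, c, b)] ++ rs.drop i
  | none => rs.take i ++ [(s, e, c, b)] ++ rs.drop i

-- for k, r in enumerate(sorted(...)): rl = _insert(rl, …, k)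
def buildB (k : Nat) (acc : List (Int × Int × List Int × Bool)) :
    List (Int × Int × List Int × Bool) → List (Int × Int × List Int × Bool)
  | [] => acc
  | r :: rest => buildB (k + 1) (insertRangeB acc r.1 r.2.1 r.2.2.1 r.2.2.2 k) rest

-- for i in range(max(s,0), min(e,n)): buf[i] = color   (every index is ≥ 0, so .toNat is exact)
def paintSeg (buf : List (Option (List Int))) (lo hi : Int) (c : List Int) :
    List (Option (List Int)) :=
  (PySem.List.pyRange lo hi 1).foldl (fun b i => b.set i.toNat (some c)) buf

def generate_color_commands_alt (text : String) (ranges : List (Int × Int × List Int × Bool)) :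
    String :=
  let rl := buildB 0 [] (PySem.List.sorted ranges (fun r => r.1))
  let cs := text.toList
  let n := cs.length
  let fb := rl.foldl
    (fun (fb : List (Option (List Int)) × List (Option (List Int))) r =>
      if r.2.2.2 then (fb.1, paintSeg fb.2 (max r.1 0) (min r.2.1 (n : Int)) r.2.2.1)
      else (paintSeg fb.1 (max r.1 0) (min r.2.1 (n : Int)) r.2.2.1, fb.2))
    (List.replicate n none, List.replicate n none)
  let out := (PySem.List.enumerate cs).foldl
    (fun (out : List String) jc =>
      let out := match fb.2.getD jc.1.toNat none with | some c => out ++ [fmtBg c] | none => out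
      let out := match fb.1.getD jc.1.toNat none with | some c => out ++ [fmtFg c] | none => out
      out ++ [String.singleton jc.2])
    []
  PySem.Str.join "" (out ++ ["\x1b[0m"])

-- ===== PRECONDITION & SPEC =====
-- Pre_ excludes inputs where a range whose interval clipped to the text, [max(s,0), min(e,len)),
-- is nonempty carries a color of fewer than 3 components: A indexes color[0..2] and raises
-- IndexError whenever such a color wins some character; on the excluded inputs where the short
-- color always loses, A still returns the same string B does (see the cite).
def Pre_generate_color_commands (text : String) (ranges : List (Int × Int × List Int × Bool)) :
    Prop :=
  ∀ r ∈ ranges, max r.1 0 < min r.2.1 (text.toList.length : Int) → 3 ≤ r.2.2.1.length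
instance (text : String) (ranges : List (Int × Int × List Int × Bool)) :
    Decidable (Pre_generate_color_commands text ranges) := by
  unfold Pre_generate_color_commands; infer_instance

def pvWitness_generate_color_commands : String × (List (Int × Int × List Int × Bool)) :=
  ("hi", [(0, 2, [10, 20, 30], false), (1, 2, [1, 2, 3], true)])

def Spec_generate_color_commands (text : String) (ranges : List (Int × Int × List Int × Bool))
    (out : String) : Prop := out = generate_color_commands_alt text ranges
instance (text : String) (ranges : List (Int × Int × List Int × Bool)) (out : String) :
    Decidable (Spec_generate_color_commands text ranges out) := by
  unfold Spec_generate_color_commands; infer_instance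

-- ===== CLAIM (what is proved, stated in full; the proofs are below) =====
def Claim_equal_generate_color_commands : Prop := ∀ (text : String) (ranges : List (Int × Int × List Int × Bool)), Dom_generate_color_commands text ranges → Pre_generate_color_commands text ranges → Spec_generate_color_commands text ranges (generate_color_commands text ranges)

-- ===== LEMMAS AND PROOFS =====

theorem insertRange_eq (rs : List (Int × Int × List Int × Bool)) (s e : Int) (c : List Int)
    (b : Bool) (lo : Nat) : insertRangeA rs s e c b lo = insertRangeB rs s e c b lo := by
  unfold insertRangeA insertRangeB
  by_cases h : pvBisect rs s lo rs.length < rs.length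
  · simp [h, List.getD_eq_getElem?_getD]
  · dsimp only
    rw [List.getElem?_eq_none_iff.mpr (Nat.le_of_not_lt h)]
    simp [h]

theorem buildB_foldl (sr : List (Int × Int × List Int × Bool)) :
    ∀ (acc : List (Int × Int × List Int × Bool)) (k : Nat),
    (sr.foldl (fun (st : List (Int × Int × List Int × Bool) × Nat) r =>
      (insertRangeB st.1 r.1 r.2.1 r.2.2.1 r.2.2.2 st.2, st.2 + 1)) (acc, k)).1
      = buildB k acc sr := by
  induction sr with
  | nil => intro acc k; rfl
  | cons r rest ih => intro acc k; simp only [List.foldl_cons, buildB]; exact ih _ _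

theorem build_eq (sr : List (Int × Int × List Int × Bool)) :
    ∀ (acc : List (Int × Int × List Int × Bool)) (k : Nat),
    (sr.foldl (fun (st : List (Int × Int × List Int × Bool) × Nat) r =>
      (insertRangeA st.1 r.1 r.2.1 r.2.2.1 r.2.2.2 st.2, st.2 + 1)) (acc, k)).1
      = buildB k acc sr := by
  simp only [insertRange_eq]
  exact buildB_foldl sr

theorem length_paintSeg (lo hi : Int) (c : List Int) :
    ∀ buf : List (Option (List Int)), (paintSeg buf lo hi c).length = buf.length := by
  unfold paintSeg
  generalize PySem.List.pyRange lo hi 1 = l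
  induction l with
  | nil => intro buf; rfl
  | cons i t ih => intro buf; simp [List.foldl_cons, ih]

theorem paintSeg_getD (c : List Int) (j : Nat) :
    ∀ (m : Nat) (lo hi : Int), (hi - lo).toNat = m → 0 ≤ lo →
    ∀ buf : List (Option (List Int)),
    (paintSeg buf lo hi c).getD j none
      = if lo ≤ (j : Int) ∧ (j : Int) < hi ∧ j < buf.length then some c
        else buf.getD j none := by
  intro m
  induction m with
  | zero =>
    intro lo hi hm hlo buf
    rw [paintSeg, PySem.List.pyRange_one_eq_nil (by omega)]
    simp only [List.foldl_nil]
    rw [if_neg (by omega)]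
  | succ m ih =>
    intro lo hi hm hlo buf
    have hlt : lo < hi := by omega
    rw [paintSeg, PySem.List.pyRange_one_cons hlt]
    simp only [List.foldl_cons]
    have : (PySem.List.pyRange (lo + 1) hi 1).foldl (fun b i => b.set i.toNat (some c))
        (buf.set lo.toNat (some c)) = paintSeg (buf.set lo.toNat (some c)) (lo + 1) hi c := rfl
    rw [this, ih (lo + 1) hi (by omega) (by omega)]
    simp only [List.length_set, List.getD_eq_getElem?_getD, List.getElem?_set]
    by_cases hje : lo.toNat = j
    · rw [if_neg (by omega), if_pos hje]
      by_cases hjb : j < buf.length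
      · rw [if_pos (hje ▸ hjb), if_pos ⟨by omega, by omega, hjb⟩]; rfl
      · rw [if_neg (hje ▸ hjb), if_neg (by omega),
          List.getElem?_eq_none_iff.mpr (Nat.le_of_not_lt hjb)]
    · rw [if_neg hje]
      split_ifs with h1 h2 <;> first | rfl | omega

-- invariant of B's painting pass: reading slot j of either layer is A's last-match fold
theorem paint_getD (n : Nat) (j : Nat) (hj : j < n) :
    ∀ (rl : List (Int × Int × List Int × Bool)) (F B : List (Option (List Int))),
    F.length = n → B.length = n →
    ((rl.foldl
        (fun (fb : List (Option (List Int)) × List (Option (List Int))) r =>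
          if r.2.2.2 then (fb.1, paintSeg fb.2 (max r.1 0) (min r.2.1 (n : Int)) r.2.2.1)
          else (paintSeg fb.1 (max r.1 0) (min r.2.1 (n : Int)) r.2.2.1, fb.2)) (F, B)).1.getD j none
      = rl.foldl (fun v r =>
          if r.1 ≤ (j : Int) ∧ (j : Int) < r.2.1 ∧ r.2.2.2 = false then some r.2.2.1 else v)
          (F.getD j none))
    ∧ ((rl.foldl
        (fun (fb : List (Option (List Int)) × List (Option (List Int))) r =>
          if r.2.2.2 then (fb.1, paintSeg fb.2 (max r.1 0) (min r.2.1 (n : Int)) r.2.2.1)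
          else (paintSeg fb.1 (max r.1 0) (min r.2.1 (n : Int)) r.2.2.1, fb.2)) (F, B)).2.getD j none
      = rl.foldl (fun v r =>
          if r.1 ≤ (j : Int) ∧ (j : Int) < r.2.1 ∧ r.2.2.2 = true then some r.2.2.1 else v)
          (B.getD j none)) := by
  intro rl
  induction rl with
  | nil => intro F B hF hB; exact ⟨rfl, rfl⟩
  | cons r t ih =>
    intro F B hF hB
    simp only [List.foldl_cons]
    cases hbg : r.2.2.2 with
    | false =>
      rw [if_neg (by simp)]
      obtain ⟨h1, h2⟩ := ih (paintSeg F (max r.1 0) (min r.2.1 (n : Int)) r.2.2.1) B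
        (by rw [length_paintSeg, hF]) hB
      refine ⟨?_, ?_⟩
      · rw [h1, paintSeg_getD r.2.2.1 j (min r.2.1 (n : Int) - max r.1 0).toNat _ _ rfl
          (by omega), hF]
        congr 1
        simp only [and_true]
        split_ifs <;> first | rfl | omega
      · rw [h2]
        congr 1
        rw [if_neg (by simp)]
    | true =>
      rw [if_pos rfl]
      obtain ⟨h1, h2⟩ := ih F (paintSeg B (max r.1 0) (min r.2.1 (n : Int)) r.2.2.1)
        hF (by rw [length_paintSeg, hB])
      refine ⟨?_, ?_⟩
      · rw [h1]
        congr 1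
        rw [if_neg (by simp)]
      · rw [h2, paintSeg_getD r.2.2.1 j (min r.2.1 (n : Int) - max r.1 0).toNat _ _ rfl
          (by omega), hB]
        congr 1
        simp only [and_true]
        split_ifs <;> first | rfl | omega

-- A's inner per-character loop keeps two independent accumulators: it is two folds
theorem inner_pair (i : Int) (rl : List (Int × Int × List Int × Bool)) :
    rl.foldl
      (fun (p : Option (List Int) × Option (List Int)) r =>
        if r.1 ≤ i ∧ i < r.2.1 then
          (if r.2.2.2 then (p.1, some r.2.2.1) else (some r.2.2.1, p.2))
        else p)
      (none, none)
    = (rl.foldl (fun v r =>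
          if r.1 ≤ i ∧ i < r.2.1 ∧ r.2.2.2 = false then some r.2.2.1 else v) none,
       rl.foldl (fun v r =>
          if r.1 ≤ i ∧ i < r.2.1 ∧ r.2.2.2 = true then some r.2.2.1 else v) none) := by
  have h : (fun (p : Option (List Int) × Option (List Int)) (r : Int × Int × List Int × Bool) =>
        if r.1 ≤ i ∧ i < r.2.1 then
          (if r.2.2.2 then (p.1, some r.2.2.1) else (some r.2.2.1, p.2))
        else p)
      = fun p r =>
        ((fun v r => if r.1 ≤ i ∧ i < r.2.1 ∧ r.2.2.2 = false then some r.2.2.1 else v) p.1 r,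
         (fun v r => if r.1 ≤ i ∧ i < r.2.1 ∧ r.2.2.2 = true then some r.2.2.1 else v) p.2 r) := by
    funext p r
    by_cases hc : r.1 ≤ i ∧ i < r.2.1 <;> cases hbg : r.2.2.2 <;>
      simp [hc, hbg]
  rw [h]
  exact PySem.List.foldl_prod_mk
    (fun v r => if r.1 ≤ i ∧ i < r.2.1 ∧ r.2.2.2 = false then some r.2.2.1 else v)
    (fun v r => if r.1 ≤ i ∧ i < r.2.1 ∧ r.2.2.2 = true then some r.2.2.1 else v) rl none none

-- the emission loops produce the same command list for any split-range list
theorem emission_eq (rl : List (Int × Int × List Int × Bool)) (cs : List Char) :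
    ((PySem.List.pyRange 0 ((cs.length : Int)) 1).foldl
      (fun (cmds : List String) i =>
        let p := rl.foldl
          (fun (p : Option (List Int) × Option (List Int)) r =>
            if r.1 ≤ i ∧ i < r.2.1 then
              (if r.2.2.2 then (p.1, some r.2.2.1) else (some r.2.2.1, p.2))
            else p)
          (none, none)
        let cmds := match p.2 with | some c => cmds ++ [fmtBg c] | none => cmds
        let cmds := match p.1 with | some c => cmds ++ [fmtFg c] | none => cmds
        cmds ++ [String.singleton (PySem.List.pyGetD cs i ' ')])
      [])
    = ((PySem.List.enumerate cs).foldl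
      (fun (out : List String) jc =>
        let fb := rl.foldl
          (fun (fb : List (Option (List Int)) × List (Option (List Int))) r =>
            if r.2.2.2 then
              (fb.1, paintSeg fb.2 (max r.1 0) (min r.2.1 (cs.length : Int)) r.2.2.1)
            else (paintSeg fb.1 (max r.1 0) (min r.2.1 (cs.length : Int)) r.2.2.1, fb.2))
          (List.replicate cs.length none, List.replicate cs.length none)
        let out := match fb.2.getD jc.1.toNat none with | some c => out ++ [fmtBg c] | none => out
        let out := match fb.1.getD jc.1.toNat none with | some c => out ++ [fmtFg c] | none => out
        out ++ [String.singleton jc.2])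
      []) := by
  rw [PySem.List.enumerate_eq_map_pyRange cs ' ', List.foldl_map]
  simp only [PySem.List.len_eq]
  apply PySem.List.foldl_congr_mem
  intro acc i hi
  rw [PySem.List.mem_pyRange_one] at hi
  obtain ⟨hp1, hp2⟩ := paint_getD cs.length i.toNat (by omega) rl
    (List.replicate cs.length none) (List.replicate cs.length none)
    (by simp) (by simp)
  simp only [inner_pair]
  rw [hp1, hp2]
  have hc : ((i.toNat : Nat) : Int) = i := by omega
  simp only [hc, List.getD_eq_getElem?_getD, List.getElem?_replicate,
    if_pos (show i.toNat < cs.length by omega), Option.getD_some]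

-- ===== VERDICT (by name: the statement is the Claim_ definition above) =====
theorem generate_color_commands_spec : Claim_equal_generate_color_commands := by
  intro text ranges _dom _pre
  unfold Spec_generate_color_commands generate_color_commands generate_color_commands_alt
  dsimp only
  rw [build_eq]
  exact congrArg (fun l => PySem.Str.join "" (l ++ ["\x1b[0m"])) (emission_eq _ _)
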